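-- pv_equiv track=rewrite | github.com/JacobJohnson1/bibleReadingPlan | bible_reading_plan_pdf_generator.py | add_section_names
-- ===== SOURCE A (Python) =====
-- def add_section_names(reading):
--     if any(x in reading for x in ("Gen", "Ex", "Lev", "Num", "Deu")):
--         return "LAW: " + reading
--     elif "Matt" in reading:
--         return "LION: " + reading
--     elif any(x in reading for x in ("Joshua", "Judges", "Ruth", "Sam", "Kings", "Chron", "Ezra", "Nehemiah", "Esther")):
--         return "HISTORY: " + reading
--     elif "Mark" in reading:
--         return "OX: " + reading
--     elif any(x in reading for x in ("Psalms", "Prov", "Eccles.", "Song", "Job")):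
--         return "WISDOM: " + reading
--     elif "Luke" in reading:
--         return "MAN: " + reading
--     elif any(x in reading for x in ("Isaiah", "Jer", "Lam", "Ezekiel", "Daniel", "Hosea", "Joel", "Amos", "Obd", "Jonah", "Micah", "Nahum", "Hab", "Zeph", "Haggai", "Zech.", "Malachi")):
--         return "PROPHETS: " + reading
--     elif "John" in reading:
--         return "EAGLE: " + reading
--     else:
--         return "NEW COV: " + reading
-- ===== SOURCE B (Python) =====
-- # B: match-all-then-argmin — scan ONE flat keyword->(rank,label) map, collect every
-- # matching section, and return the label of the lowest-ranked hit (no early-exit cascade).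
-- KEYWORDS = {
--     "Gen": (0, "LAW"), "Ex": (0, "LAW"), "Lev": (0, "LAW"), "Num": (0, "LAW"), "Deu": (0, "LAW"),
--     "Matt": (1, "LION"),
--     "Joshua": (2, "HISTORY"), "Judges": (2, "HISTORY"), "Ruth": (2, "HISTORY"), "Sam": (2, "HISTORY"),
--     "Kings": (2, "HISTORY"), "Chron": (2, "HISTORY"), "Ezra": (2, "HISTORY"), "Nehemiah": (2, "HISTORY"),
--     "Esther": (2, "HISTORY"),
--     "Mark": (3, "OX"),
--     "Psalms": (4, "WISDOM"), "Prov": (4, "WISDOM"), "Eccles.": (4, "WISDOM"), "Song": (4, "WISDOM"),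
--     "Job": (4, "WISDOM"),
--     "Luke": (5, "MAN"),
--     "Isaiah": (6, "PROPHETS"), "Jer": (6, "PROPHETS"), "Lam": (6, "PROPHETS"), "Ezekiel": (6, "PROPHETS"),
--     "Daniel": (6, "PROPHETS"), "Hosea": (6, "PROPHETS"), "Joel": (6, "PROPHETS"), "Amos": (6, "PROPHETS"),
--     "Obd": (6, "PROPHETS"), "Jonah": (6, "PROPHETS"), "Micah": (6, "PROPHETS"), "Nahum": (6, "PROPHETS"),
--     "Hab": (6, "PROPHETS"), "Zeph": (6, "PROPHETS"), "Haggai": (6, "PROPHETS"), "Zech.": (6, "PROPHETS"),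
--     "Malachi": (6, "PROPHETS"),
--     "John": (7, "EAGLE"),
-- }
--
-- def add_section_names(reading):
--     hits = [v for kw, v in KEYWORDS.items() if kw in reading]
--     if not hits:
--         return "NEW COV: " + reading
--     return min(hits, key=lambda v: v[0])[1] + ": " + reading
-- ===== Notes on version B (the rewrite author's own statement) =====
-- stated objective: alternative
-- what changed: Instead of A's ordered early-exit if/elif cascade, B scans one flat keyword->(rank,label) map, collects ALL matching sections, and returns the label of the minimum-rank hit (match-all then argmin).
import Mathlib
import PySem

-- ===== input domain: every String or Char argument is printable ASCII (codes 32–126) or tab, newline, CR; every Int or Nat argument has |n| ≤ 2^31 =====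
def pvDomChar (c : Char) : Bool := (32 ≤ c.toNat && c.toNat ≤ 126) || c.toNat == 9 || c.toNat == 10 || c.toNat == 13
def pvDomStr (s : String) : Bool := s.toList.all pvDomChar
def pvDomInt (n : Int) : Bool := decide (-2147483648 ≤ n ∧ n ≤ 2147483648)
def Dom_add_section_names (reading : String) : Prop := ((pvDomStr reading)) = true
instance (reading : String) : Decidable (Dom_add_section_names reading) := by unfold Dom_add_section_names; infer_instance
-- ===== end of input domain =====

-- B: instead of A's ordered early-exit cascade, scan one flat keyword->(rank,label)
-- map, collect ALL matching sections, and return the label of the lowest-ranked hit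
-- (objective: alternative algorithm, same cost).

-- ===== PORT A =====
def add_section_names (reading : String) : String :=
  if ["Gen", "Ex", "Lev", "Num", "Deu"].any (fun x => PySem.Str.isIn x reading) then
    "LAW: " ++ reading
  else if PySem.Str.isIn "Matt" reading then
    "LION: " ++ reading
  else if ["Joshua", "Judges", "Ruth", "Sam", "Kings", "Chron", "Ezra", "Nehemiah", "Esther"].any (fun x => PySem.Str.isIn x reading) then
    "HISTORY: " ++ reading
  else if PySem.Str.isIn "Mark" reading then
    "OX: " ++ reading
  else if ["Psalms", "Prov", "Eccles.", "Song", "Job"].any (fun x => PySem.Str.isIn x reading) then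
    "WISDOM: " ++ reading
  else if PySem.Str.isIn "Luke" reading then
    "MAN: " ++ reading
  else if ["Isaiah", "Jer", "Lam", "Ezekiel", "Daniel", "Hosea", "Joel", "Amos", "Obd", "Jonah", "Micah", "Nahum", "Hab", "Zeph", "Haggai", "Zech.", "Malachi"].any (fun x => PySem.Str.isIn x reading) then
    "PROPHETS: " ++ reading
  else if PySem.Str.isIn "John" reading then
    "EAGLE: " ++ reading
  else
    "NEW COV: " ++ reading

-- ===== PORT B =====
-- the flat keyword -> (rank, label) dict of Source B (no key repeats, so an assoc list literal)
def pvKeywords : List (String × (Int × String)) :=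
  [("Gen", (0, "LAW")), ("Ex", (0, "LAW")), ("Lev", (0, "LAW")), ("Num", (0, "LAW")), ("Deu", (0, "LAW")),
   ("Matt", (1, "LION")),
   ("Joshua", (2, "HISTORY")), ("Judges", (2, "HISTORY")), ("Ruth", (2, "HISTORY")), ("Sam", (2, "HISTORY")),
   ("Kings", (2, "HISTORY")), ("Chron", (2, "HISTORY")), ("Ezra", (2, "HISTORY")), ("Nehemiah", (2, "HISTORY")),
   ("Esther", (2, "HISTORY")),
   ("Mark", (3, "OX")),
   ("Psalms", (4, "WISDOM")), ("Prov", (4, "WISDOM")), ("Eccles.", (4, "WISDOM")), ("Song", (4, "WISDOM")),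
   ("Job", (4, "WISDOM")),
   ("Luke", (5, "MAN")),
   ("Isaiah", (6, "PROPHETS")), ("Jer", (6, "PROPHETS")), ("Lam", (6, "PROPHETS")), ("Ezekiel", (6, "PROPHETS")),
   ("Daniel", (6, "PROPHETS")), ("Hosea", (6, "PROPHETS")), ("Joel", (6, "PROPHETS")), ("Amos", (6, "PROPHETS")),
   ("Obd", (6, "PROPHETS")), ("Jonah", (6, "PROPHETS")), ("Micah", (6, "PROPHETS")), ("Nahum", (6, "PROPHETS")),
   ("Hab", (6, "PROPHETS")), ("Zeph", (6, "PROPHETS")), ("Haggai", (6, "PROPHETS")), ("Zech.", (6, "PROPHETS")),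
   ("Malachi", (6, "PROPHETS")),
   ("John", (7, "EAGLE"))]

-- hits = [v for kw, v in KEYWORDS.items() if kw in reading]
def pvHits (reading : String) : List (Int × String) :=
  pvKeywords.filterMap (fun p => if PySem.Str.isIn p.1 reading then some p.2 else none)

def add_section_names_alt (reading : String) : String :=
  match PySem.List.min? (pvHits reading) (fun v => v.1) with
  | none => "NEW COV: " ++ reading
  | some v => v.2 ++ ": " ++ reading

-- ===== PRECONDITION & SPEC =====
def Spec_add_section_names (reading : String) (out : String) : Prop := out = add_section_names_alt reading
instance (reading : String) (out : String) : Decidable (Spec_add_section_names reading out) := by unfold Spec_add_section_names; infer_instance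

-- ===== CLAIM (what is proved, stated in full; the proofs are below) =====
def Claim_equal_add_section_names : Prop := ∀ (reading : String), Dom_add_section_names reading → Spec_add_section_names reading (add_section_names reading)

-- ===== LEMMAS AND PROOFS =====

-- every hit comes from a keyword entry whose keyword occurs in `reading`
theorem pvHits_mem {reading : String} {v : Int × String} (hv : v ∈ pvHits reading) :
    ∃ kw, (kw, v) ∈ pvKeywords ∧ PySem.Str.isIn kw reading = true := by
  simp only [pvHits, List.mem_filterMap] at hv
  obtain ⟨p, hp, hf⟩ := hv
  split at hf
  next h =>
    obtain rfl : p.2 = v := Option.some.inj hf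
    exact ⟨p.1, hp, h⟩
  next => exact absurd hf (by simp)

theorem mem_pvHits_of {reading kw : String} {v : Int × String}
    (hkw : (kw, v) ∈ pvKeywords) (h : PySem.Str.isIn kw reading = true) :
    v ∈ pvHits reading :=
  List.mem_filterMap.mpr ⟨(kw, v), hkw, by simpa [PySem.Str.isIn] using h⟩

-- B returns label L whenever (k, L) is a hit and every hit has rank ≥ k, rank-k hits labelled L
theorem alt_eq_of {reading : String} {k : Int} {L : String}
    (hmem : (k, L) ∈ pvHits reading)
    (hchar : ∀ v ∈ pvHits reading, k ≤ v.1 ∧ (v.1 = k → v.2 = L)) :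
    add_section_names_alt reading = L ++ ": " ++ reading := by
  have hne : pvHits reading ≠ [] := List.ne_nil_of_mem hmem
  obtain ⟨m, hm⟩ : ∃ m, PySem.List.min? (pvHits reading) (fun v => v.1) = some m := by
    cases h : PySem.List.min? (pvHits reading) (fun v => v.1) with
    | none => exact absurd ((PySem.List.min?_eq_none_iff _ _).mp h) hne
    | some m => exact ⟨m, rfl⟩
  have hmmem := PySem.List.min?_mem hm
  have hmin := PySem.List.min?_isMin hm (k, L) hmem
  obtain ⟨hk, hlab⟩ := hchar m hmmem
  have hm1 : m.1 = k := le_antisymm hmin hk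
  simp [add_section_names_alt, hm, hlab hm1]

-- ===== VERDICT (by name: the statement is the Claim_ definition above) =====
set_option maxHeartbeats 2000000 in
theorem add_section_names_spec : Claim_equal_add_section_names := by
  intro reading _
  unfold Spec_add_section_names add_section_names
  split_ifs with h0 h1 h2 h3 h4 h5 h6 h7
  · -- LAW
    simp only [List.any_cons, List.any_nil, Bool.or_eq_true, not_or, Bool.not_eq_true, Bool.false_eq_true, or_false] at h0
    have hchar : ∀ v ∈ pvHits reading, (0:Int) ≤ v.1 ∧ (v.1 = 0 → v.2 = "LAW") := by
      intro v hv
      obtain ⟨kw, hkv, hin⟩ := pvHits_mem hv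
      fin_cases hkv <;> simp_all
    have hmem : ((0 : Int), "LAW") ∈ pvHits reading := by
      rcases h0 with h|h|h|h|h
      · exact mem_pvHits_of (kw := "Gen") (by simp [pvKeywords]) h
      · exact mem_pvHits_of (kw := "Ex") (by simp [pvKeywords]) h
      · exact mem_pvHits_of (kw := "Lev") (by simp [pvKeywords]) h
      · exact mem_pvHits_of (kw := "Num") (by simp [pvKeywords]) h
      · exact mem_pvHits_of (kw := "Deu") (by simp [pvKeywords]) h
    rw [alt_eq_of hmem hchar]
    rfl
  · -- LION
    simp only [List.any_cons, List.any_nil, Bool.or_eq_true, not_or, Bool.not_eq_true, Bool.false_eq_true, or_false] at h0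
    have hchar : ∀ v ∈ pvHits reading, (1:Int) ≤ v.1 ∧ (v.1 = 1 → v.2 = "LION") := by
      intro v hv
      obtain ⟨kw, hkv, hin⟩ := pvHits_mem hv
      fin_cases hkv <;> simp_all
    have hmem : ((1 : Int), "LION") ∈ pvHits reading := by
      exact mem_pvHits_of (kw := "Matt") (by simp [pvKeywords]) h1
    rw [alt_eq_of hmem hchar]
    rfl
  · -- HISTORY
    simp only [List.any_cons, List.any_nil, Bool.or_eq_true, not_or, Bool.not_eq_true, Bool.false_eq_true, or_false] at h0 h1 h2
    have hchar : ∀ v ∈ pvHits reading, (2:Int) ≤ v.1 ∧ (v.1 = 2 → v.2 = "HISTORY") := by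
      intro v hv
      obtain ⟨kw, hkv, hin⟩ := pvHits_mem hv
      fin_cases hkv <;> simp_all
    have hmem : ((2 : Int), "HISTORY") ∈ pvHits reading := by
      rcases h2 with h|h|h|h|h|h|h|h|h
      · exact mem_pvHits_of (kw := "Joshua") (by simp [pvKeywords]) h
      · exact mem_pvHits_of (kw := "Judges") (by simp [pvKeywords]) h
      · exact mem_pvHits_of (kw := "Ruth") (by simp [pvKeywords]) h
      · exact mem_pvHits_of (kw := "Sam") (by simp [pvKeywords]) h
      · exact mem_pvHits_of (kw := "Kings") (by simp [pvKeywords]) h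
      · exact mem_pvHits_of (kw := "Chron") (by simp [pvKeywords]) h
      · exact mem_pvHits_of (kw := "Ezra") (by simp [pvKeywords]) h
      · exact mem_pvHits_of (kw := "Nehemiah") (by simp [pvKeywords]) h
      · exact mem_pvHits_of (kw := "Esther") (by simp [pvKeywords]) h
    rw [alt_eq_of hmem hchar]
    rfl
  · -- OX
    simp only [List.any_cons, List.any_nil, Bool.or_eq_true, not_or, Bool.not_eq_true, Bool.false_eq_true, or_false] at h0 h1 h2
    have hchar : ∀ v ∈ pvHits reading, (3:Int) ≤ v.1 ∧ (v.1 = 3 → v.2 = "OX") := by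
      intro v hv
      obtain ⟨kw, hkv, hin⟩ := pvHits_mem hv
      fin_cases hkv <;> simp_all
    have hmem : ((3 : Int), "OX") ∈ pvHits reading := by
      exact mem_pvHits_of (kw := "Mark") (by simp [pvKeywords]) h3
    rw [alt_eq_of hmem hchar]
    rfl
  · -- WISDOM
    simp only [List.any_cons, List.any_nil, Bool.or_eq_true, not_or, Bool.not_eq_true, Bool.false_eq_true, or_false] at h0 h1 h2 h3 h4
    have hchar : ∀ v ∈ pvHits reading, (4:Int) ≤ v.1 ∧ (v.1 = 4 → v.2 = "WISDOM") := by
      intro v hv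
      obtain ⟨kw, hkv, hin⟩ := pvHits_mem hv
      fin_cases hkv <;> simp_all
    have hmem : ((4 : Int), "WISDOM") ∈ pvHits reading := by
      rcases h4 with h|h|h|h|h
      · exact mem_pvHits_of (kw := "Psalms") (by simp [pvKeywords]) h
      · exact mem_pvHits_of (kw := "Prov") (by simp [pvKeywords]) h
      · exact mem_pvHits_of (kw := "Eccles.") (by simp [pvKeywords]) h
      · exact mem_pvHits_of (kw := "Song") (by simp [pvKeywords]) h
      · exact mem_pvHits_of (kw := "Job") (by simp [pvKeywords]) h
    rw [alt_eq_of hmem hchar]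
    rfl
  · -- MAN
    simp only [List.any_cons, List.any_nil, Bool.or_eq_true, not_or, Bool.not_eq_true, Bool.false_eq_true, or_false] at h0 h1 h2 h3 h4
    have hchar : ∀ v ∈ pvHits reading, (5:Int) ≤ v.1 ∧ (v.1 = 5 → v.2 = "MAN") := by
      intro v hv
      obtain ⟨kw, hkv, hin⟩ := pvHits_mem hv
      fin_cases hkv <;> simp_all
    have hmem : ((5 : Int), "MAN") ∈ pvHits reading := by
      exact mem_pvHits_of (kw := "Luke") (by simp [pvKeywords]) h5
    rw [alt_eq_of hmem hchar]
    rfl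
  · -- PROPHETS
    simp only [List.any_cons, List.any_nil, Bool.or_eq_true, not_or, Bool.not_eq_true, Bool.false_eq_true, or_false] at h0 h1 h2 h3 h4 h5 h6
    have hchar : ∀ v ∈ pvHits reading, (6:Int) ≤ v.1 ∧ (v.1 = 6 → v.2 = "PROPHETS") := by
      intro v hv
      obtain ⟨kw, hkv, hin⟩ := pvHits_mem hv
      fin_cases hkv <;> simp_all
    have hmem : ((6 : Int), "PROPHETS") ∈ pvHits reading := by
      rcases h6 with h|h|h|h|h|h|h|h|h|h|h|h|h|h|h|h|h
      · exact mem_pvHits_of (kw := "Isaiah") (by simp [pvKeywords]) h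
      · exact mem_pvHits_of (kw := "Jer") (by simp [pvKeywords]) h
      · exact mem_pvHits_of (kw := "Lam") (by simp [pvKeywords]) h
      · exact mem_pvHits_of (kw := "Ezekiel") (by simp [pvKeywords]) h
      · exact mem_pvHits_of (kw := "Daniel") (by simp [pvKeywords]) h
      · exact mem_pvHits_of (kw := "Hosea") (by simp [pvKeywords]) h
      · exact mem_pvHits_of (kw := "Joel") (by simp [pvKeywords]) h
      · exact mem_pvHits_of (kw := "Amos") (by simp [pvKeywords]) h
      · exact mem_pvHits_of (kw := "Obd") (by simp [pvKeywords]) h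
      · exact mem_pvHits_of (kw := "Jonah") (by simp [pvKeywords]) h
      · exact mem_pvHits_of (kw := "Micah") (by simp [pvKeywords]) h
      · exact mem_pvHits_of (kw := "Nahum") (by simp [pvKeywords]) h
      · exact mem_pvHits_of (kw := "Hab") (by simp [pvKeywords]) h
      · exact mem_pvHits_of (kw := "Zeph") (by simp [pvKeywords]) h
      · exact mem_pvHits_of (kw := "Haggai") (by simp [pvKeywords]) h
      · exact mem_pvHits_of (kw := "Zech.") (by simp [pvKeywords]) h
      · exact mem_pvHits_of (kw := "Malachi") (by simp [pvKeywords]) h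
    rw [alt_eq_of hmem hchar]
    rfl
  · -- EAGLE
    simp only [List.any_cons, List.any_nil, Bool.or_eq_true, not_or, Bool.not_eq_true, Bool.false_eq_true, or_false] at h0 h1 h2 h3 h4 h5 h6
    have hchar : ∀ v ∈ pvHits reading, (7:Int) ≤ v.1 ∧ (v.1 = 7 → v.2 = "EAGLE") := by
      intro v hv
      obtain ⟨kw, hkv, hin⟩ := pvHits_mem hv
      fin_cases hkv <;> simp_all
    have hmem : ((7 : Int), "EAGLE") ∈ pvHits reading := by
      exact mem_pvHits_of (kw := "John") (by simp [pvKeywords]) h7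
    rw [alt_eq_of hmem hchar]
    rfl
  · -- NEW COV
    simp only [List.any_cons, List.any_nil, Bool.or_eq_true, not_or, Bool.not_eq_true, Bool.false_eq_true, or_false] at h0 h1 h2 h3 h4 h5 h6 h7
    have hnil : pvHits reading = [] := by
      rw [pvHits, List.filterMap_eq_nil_iff]
      intro p hp
      fin_cases hp <;> simp_all
    simp [add_section_names_alt, hnil, PySem.List.min?]
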